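-- pv_equiv track=rewrite | github.com/Dverogki/LR_7 | LR_7.py | path_to_adjacency
-- ===== SOURCE A (Python) =====
-- def path_to_adjacency(path):
--     adjacency = {}
--     nodes = list(path.keys())
--     for node in nodes:
--         materialized = path[node]
--         parts = materialized.split(',')
--
--         if len(parts) == 1:
--             if node not in adjacency:
--                 adjacency[node] = []
--         else:
--             parent = parts[1]
--
--             if parent not in adjacency:
--                 adjacency[parent] = []
--
--             if node not in adjacency[parent]:
--                 adjacency[parent].append(node)
--
--             if node not in adjacency:
--                 adjacency[node] = []
--     return adjacency
-- ===== SOURCE B (Python) =====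
-- def path_to_adjacency(path):
--     # pass 1: group each node under its parent (second component of its materialized path)
--     children = {}
--     for node, materialized in path.items():
--         parts = materialized.split(',')
--         if len(parts) != 1:
--             children.setdefault(parts[1], []).append(node)
--     # pass 2: vertex keys in order of first mention (parent before its child), then assemble
--     order = dict.fromkeys(
--         k
--         for node, materialized in path.items()
--         for k in ([node] if len(materialized.split(',')) == 1
--                   else [materialized.split(',')[1], node])
--     )
--     return {k: children.get(k, []) for k in order}
-- ===== Notes on version B (the rewrite author's own statement) =====
-- stated objective: alternative
-- what changed: Replaces the single interleaved pass that mutates the adjacency dict (conditional inserts, membership-checked appends) by three separate shaped passes: a setdefault grouping pass building a parent->children dict, a dict.fromkeys dedup computing the vertex order (parent before child, first mention), and a final comprehension assembling the result.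
import Mathlib
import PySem

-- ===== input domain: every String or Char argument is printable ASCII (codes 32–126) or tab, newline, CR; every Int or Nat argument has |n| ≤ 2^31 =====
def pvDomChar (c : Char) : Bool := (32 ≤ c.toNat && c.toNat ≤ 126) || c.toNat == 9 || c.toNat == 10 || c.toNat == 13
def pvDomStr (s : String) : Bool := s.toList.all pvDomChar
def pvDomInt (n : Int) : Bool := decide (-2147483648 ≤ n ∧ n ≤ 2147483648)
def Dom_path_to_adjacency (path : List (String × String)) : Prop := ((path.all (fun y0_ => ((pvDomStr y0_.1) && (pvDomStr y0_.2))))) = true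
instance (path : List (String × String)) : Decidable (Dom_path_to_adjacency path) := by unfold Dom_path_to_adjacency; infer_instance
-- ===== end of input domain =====

-- B replaces A's single interleaved dict-mutating pass by three shaped passes (group children by
-- parent, dedup the vertex order, assemble); not faster, a structural alternative.

-- ===== PORT A =====
-- parts = materialized.split(',') — sep "," ≠ "" so split? is always some; .getD [] never fires
def pvPartsOf (materialized : String) : List String := (PySem.Str.split? materialized ",").getD []

-- one iteration of A's `for node in nodes:` loop body, mutating `adjacency`
def pvStepA (adjacency : PySem.Dict String (List String)) (p : String × String) :
    PySem.Dict String (List String) :=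
  let parts := pvPartsOf p.2
  if parts.length == 1 then
    if adjacency.contains p.1 then adjacency else adjacency.insert p.1 []
  else
    let parent := parts.getD 1 ""   -- parts[1]; total: parts has ≥ 2 elements here
    let a1 := if adjacency.contains parent then adjacency else adjacency.insert parent []
    let a2 := if (a1.getD parent []).contains p.1 then a1
              else a1.modify parent [] (fun l => l ++ [p.1])   -- adjacency[parent].append(node)
    if a2.contains p.1 then a2 else a2.insert p.1 []

-- A: iterate over the dict's keys looking each value up (= iterate its items), fold the loop body
def path_to_adjacency (path : List (String × String)) : List (String × List String) :=
  ((PySem.Dict.ofList path).items.foldl pvStepA PySem.Dict.empty).items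

-- ===== PORT B =====
-- pass-1 body: children.setdefault(parts[1], []).append(node) when len(parts) != 1
def pvStepC (children : PySem.Dict String (List String)) (p : String × String) :
    PySem.Dict String (List String) :=
  let parts := pvPartsOf p.2
  if parts.length == 1 then children
  else children.modify (parts.getD 1 "") [] (fun l => l ++ [p.1])

-- the keys one item contributes to `order`: [node] or [parent, node]
def pvKeysOf (p : String × String) : List String :=
  let parts := pvPartsOf p.2
  if parts.length == 1 then [p.1] else [parts.getD 1 "", p.1]

def path_to_adjacency_alt (path : List (String × String)) : List (String × List String) :=
  let items := (PySem.Dict.ofList path).items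
  let children := items.foldl pvStepC PySem.Dict.empty
  let order := PySem.List.dedup (items.flatMap pvKeysOf)   -- dict.fromkeys(...)
  order.map (fun k => (k, children.getD k []))             -- {k: children.get(k, []) for k in order}

-- ===== PRECONDITION & SPEC =====
def Spec_path_to_adjacency (path : List (String × String)) (out : List (String × List String)) : Prop := out = path_to_adjacency_alt path
instance (path : List (String × String)) (out : List (String × List String)) : Decidable (Spec_path_to_adjacency path out) := by unfold Spec_path_to_adjacency; infer_instance

-- ===== CLAIM (what is proved, stated in full; the proofs are below) =====
def Claim_equal_path_to_adjacency : Prop := ∀ (path : List (String × String)), Dom_path_to_adjacency path → Spec_path_to_adjacency path (path_to_adjacency path)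

-- ===== LEMMAS AND PROOFS =====

-- Invariant of the joint induction over the item list `l` (A's loop state vs B's three passes):
-- (1) A's adjacency items are exactly B's order mapped through B's children dict;
-- (2) every key of B's children dict was already mentioned (is in the order list);
-- (3) every recorded child is a node of the prefix `l`.
theorem pv_main (l : List (String × String)) (h : (l.map Prod.fst).Nodup) :
    (l.foldl pvStepA PySem.Dict.empty).items
      = (PySem.Set.ofList (l.flatMap pvKeysOf)).map
          (fun k => (k, (l.foldl pvStepC PySem.Dict.empty).getD k []))
    ∧ (∀ k, (l.foldl pvStepC PySem.Dict.empty).contains k = true → k ∈ l.flatMap pvKeysOf)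
    ∧ (∀ k x, x ∈ (l.foldl pvStepC PySem.Dict.empty).getD k [] → x ∈ l.map Prod.fst) := by
  induction l using List.reverseRecOn with
  | nil =>
    refine ⟨rfl, ?_, ?_⟩ <;> intro k <;>
      simp [PySem.Dict.contains_empty, PySem.Dict.getD_empty]
  | append_singleton l p ih =>
    rw [List.map_append] at h
    have h' : (l.map Prod.fst).Nodup ∧ p.1 ∉ l.map Prod.fst :=
      ⟨h.of_append_left, fun hm => h.disjoint hm (by simp)⟩
    obtain ⟨ih1, ih2, ih3⟩ := ih h'.1
    set A := l.foldl pvStepA PySem.Dict.empty with hA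
    set C := l.foldl pvStepC PySem.Dict.empty with hC
    set O := PySem.Set.ofList (l.flatMap pvKeysOf) with hO
    have hOnd : O.Nodup := PySem.Set.nodup_ofList _
    have hAkeys : A.keys = O := by
      simp only [PySem.Dict.keys, ih1, List.map_map]
      simp [Function.comp_def]
    have hAnd : A.keys.Nodup := by rw [hAkeys]; exact hOnd
    have hcont : ∀ k, A.contains k = decide (k ∈ O) := by
      intro k; rw [PySem.Dict.contains_eq_decide_mem_keys, hAkeys]
    have hgetD : ∀ k ∈ O, A.getD k [] = C.getD k [] := by
      intro k hk
      exact PySem.Dict.getD_of_mem_items A (by rw [ih1]; exact List.mem_map_of_mem hk) hAnd []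
    have hCcont : ∀ k, k ∉ O → C.contains k = false := by
      intro k hk
      cases hcc : C.contains k with
      | false => rfl
      | true => exact absurd ((PySem.Set.mem_ofList _ _).2 (ih2 k hcc)) hk
    have hCnot : ∀ k, k ∉ O → C.getD k [] = [] := by
      intro k hk; exact PySem.Dict.getD_of_not_contains C [] (hCcont k hk)
    rw [List.foldl_append, List.foldl_append, List.flatMap_append]
    simp only [List.foldl_cons, List.foldl_nil, List.flatMap_cons, List.flatMap_nil,
      List.append_nil, List.map_append, ← hA, ← hC]
    rw [PySem.Set.ofList_append, ← hO]
    cases hlen : (pvPartsOf p.2).length == 1 with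
    | true =>
      simp only [pvStepA, pvStepC, pvKeysOf, hlen, if_pos]
      rw [PySem.Set.update_cons, PySem.Set.update_nil]
      refine ⟨?_, ?_, ?_⟩
      · by_cases hp1 : p.1 ∈ O
        · rw [PySem.Set.add_of_mem hp1]
          simp only [hcont p.1, hp1, decide_true, if_true]
          exact ih1
        · rw [PySem.Set.add_of_not_mem hp1]
          simp only [hcont p.1, hp1, decide_false, if_false, Bool.false_eq_true]
          rw [PySem.Dict.items_insert_of_not_contains A [] (by rw [hcont]; simpa using hp1)]
          rw [List.map_append, ih1]
          simp [hCnot p.1 hp1]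
      · intro k hk
        exact List.mem_append_left _ (ih2 k hk)
      · intro k x hx
        exact List.mem_append_left _ (ih3 k x hx)
    | false =>
      simp only [pvStepA, pvStepC, pvKeysOf, hlen, Bool.false_eq_true, if_false]
      set parent := (pvPartsOf p.2).getD 1 "" with hpar
      rw [PySem.Set.update_cons, PySem.Set.update_cons, PySem.Set.update_nil]
      set C' := C.modify parent [] (fun l => l ++ [p.1]) with hC'
      have hC'par : C'.getD parent [] = C.getD parent [] ++ [p.1] :=
        PySem.Dict.getD_modify_self C parent [] _
      have hC'ne : ∀ k, k ≠ parent → C'.getD k [] = C.getD k [] := by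
        intro k hk
        exact PySem.Dict.getD_modify_of_ne C [] _ hk
      have hinv2 : ∀ k, C'.contains k = true → k ∈ l.flatMap pvKeysOf ++ [parent, p.1] := by
        intro k hk
        rw [hC', PySem.Dict.contains_modify] at hk
        rcases Bool.or_eq_true_iff.1 hk with hk | hk
        · simp [eq_of_beq hk]
        · exact List.mem_append_left _ (ih2 k hk)
      have hinv3 : ∀ k x, x ∈ C'.getD k [] → x ∈ l.map Prod.fst ++ [p.1] := by
        intro k x hx
        by_cases hkp : k = parent
        · rw [hkp, hC'par] at hx
          rcases List.mem_append.1 hx with hx | hx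
          · exact List.mem_append_left _ (ih3 parent x hx)
          · simp at hx; simp [hx]
        · exact List.mem_append_left _ (ih3 k x (by rwa [hC'ne k hkp] at hx))
      by_cases hpO : parent ∈ O
      · -- parent already a key: the conditional insert is a no-op
        have ha1 : (if A.contains parent then A else A.insert parent []) = A := by
          simp [hcont parent, hpO]
        rw [ha1]
        have hAgd : A.getD parent [] = C.getD parent [] := hgetD parent hpO
        have hmem : (A.getD parent []).contains p.1 = false := by
          rw [hAgd]
          simp only [List.contains_eq_mem, decide_eq_false_iff_not]
          intro hmm
          exact h'.2 (ih3 parent p.1 hmm)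
        simp only [hmem, Bool.false_eq_true, if_false]
        have ha2 : A.modify parent [] (fun l => l ++ [p.1]) = A.insert parent (C.getD parent [] ++ [p.1]) := by
          rw [PySem.Dict.modify, hAgd]
        rw [ha2]
        have hitems2 : (A.insert parent (C.getD parent [] ++ [p.1])).items
            = O.map (fun k => (k, C'.getD k [])) := by
          rw [PySem.Dict.items_insert_of_contains A _ (by rw [hcont]; simpa using hpO), ih1,
            List.map_map]
          refine List.map_congr_left ?_
          intro k hk
          by_cases hkp : k = parent
          · simp [Function.comp, hkp, hC'par]
          · simp [Function.comp, hkp, hC'ne k hkp]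
        have hcont2 : ∀ j, (A.insert parent (C.getD parent [] ++ [p.1])).contains j
            = (j == parent || decide (j ∈ O)) := by
          intro j
          rw [PySem.Dict.contains_insert, hcont]
        rw [PySem.Set.add_of_mem hpO]
        by_cases hnode : p.1 = parent ∨ p.1 ∈ O
        · have : (p.1 == parent || decide (p.1 ∈ O)) = true := by
            rcases hnode with hh | hh <;> simp [hh]
          have hcT : (A.insert parent (C.getD parent [] ++ [p.1])).contains p.1 = true := by
            rw [hcont2]; exact this
          simp only [hcT, if_true]
          have hO' : O.add p.1 = O := by
            rcases hnode with hh | hh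
            · exact PySem.Set.add_of_mem (hh ▸ hpO)
            · exact PySem.Set.add_of_mem hh
          rw [hO']
          exact ⟨hitems2, hinv2, hinv3⟩
        · push Not at hnode
          have hcf : (p.1 == parent || decide (p.1 ∈ O)) = false := by
            simp [hnode.1, hnode.2]
          have hcF : (A.insert parent (C.getD parent [] ++ [p.1])).contains p.1 = false := by
            rw [hcont2]; exact hcf
          simp only [hcF, Bool.false_eq_true, if_false]
          rw [PySem.Dict.items_insert_of_not_contains _ [] hcF]
          rw [hitems2, PySem.Set.add_of_not_mem hnode.2, List.map_append]
          refine ⟨by simp [hC'ne p.1 hnode.1, hCnot p.1 hnode.2], hinv2, hinv3⟩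
      · -- parent is a fresh key: it is appended with an empty list, then updated
        have ha1 : (if A.contains parent then A else A.insert parent []) = A.insert parent [] := by
          simp [hcont parent, hpO]
        rw [ha1]
        have hmem : ((A.insert parent []).getD parent []).contains p.1 = false := by
          rw [PySem.Dict.getD_insert_self]
          rfl
        simp only [hmem, Bool.false_eq_true, if_false]
        have ha2 : (A.insert parent []).modify parent [] (fun l => l ++ [p.1])
            = A.insert parent [p.1] := by
          rw [PySem.Dict.modify, PySem.Dict.getD_insert_self, PySem.Dict.insert_insert_self]
          rfl
        rw [ha2]
        have hAparf : A.contains parent = false := by rw [hcont]; simpa using hpO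
        have hitems2 : (A.insert parent [p.1]).items
            = O.map (fun k => (k, C'.getD k [])) ++ [(parent, C'.getD parent [])] := by
          rw [PySem.Dict.items_insert_of_not_contains A _ hAparf, ih1]
          congr 1
          · refine List.map_congr_left ?_
            intro k hk
            rw [hC'ne k (by rintro rfl; exact hpO hk)]
          · rw [hC'par, hCnot parent hpO]
            simp
        have hcont2 : ∀ j, (A.insert parent [p.1]).contains j
            = (j == parent || decide (j ∈ O)) := by
          intro j
          rw [PySem.Dict.contains_insert, hcont]
        rw [PySem.Set.add_of_not_mem hpO]
        by_cases hnode : p.1 = parent ∨ p.1 ∈ O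
        · have : (p.1 == parent || decide (p.1 ∈ O)) = true := by
            rcases hnode with hh | hh <;> simp [hh]
          have hcT : (A.insert parent [p.1]).contains p.1 = true := by
            rw [hcont2]; exact this
          simp only [hcT, if_true]
          have hO' : (O ++ [parent] : PySem.Set String).add p.1 = O ++ [parent] := by
            refine PySem.Set.add_of_mem ?_
            rcases hnode with hh | hh
            · simp [hh]
            · exact List.mem_append_left _ hh
          rw [hO', List.map_append]
          refine ⟨?_, hinv2, hinv3⟩
          rw [hitems2]
          simp
        · push Not at hnode
          have hcf : (p.1 == parent || decide (p.1 ∈ O)) = false := by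
            simp [hnode.1, hnode.2]
          have hcF : (A.insert parent [p.1]).contains p.1 = false := by
            rw [hcont2]; exact hcf
          simp only [hcF, Bool.false_eq_true, if_false]
          rw [PySem.Dict.items_insert_of_not_contains _ [] hcF]
          have hO' : (O ++ [parent] : PySem.Set String).add p.1 = (O ++ [parent]) ++ [p.1] := by
            refine PySem.Set.add_of_not_mem ?_
            simp only [List.mem_append, List.mem_singleton]
            rintro (hh | hh)
            · exact hnode.2 hh
            · exact hnode.1 hh
          rw [hitems2, hO', List.map_append, List.map_append]
          refine ⟨?_, hinv2, hinv3⟩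
          simp [hC'ne p.1 hnode.1, hCnot p.1 hnode.2]

theorem path_to_adjacency_spec : Claim_equal_path_to_adjacency := by
  intro path _
  unfold Spec_path_to_adjacency path_to_adjacency path_to_adjacency_alt
  have h : ((PySem.Dict.ofList path).items.map Prod.fst).Nodup := by
    have := PySem.Dict.nodup_keys_ofList (κ := String) (ν := String) path
    simpa [PySem.Dict.keys] using this
  exact (pv_main (PySem.Dict.ofList path).items h).1
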